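-- pv_equiv track=rewrite | github.com/jae-hun-e/codingTestPractice | programmers/01.hash/04.위장/python/01.py | solution
-- ===== SOURCE A (Python) =====
-- def solution(args):
--
--     map ={}
--     for arg in args:
--         map[arg[1]] = map[arg[1]] + 1 if arg[1] in map else 1
--
--     answer = 1
--     for arg in map.values():
--         answer *= arg + 1
--     return answer - 1
-- ===== SOURCE B (Python) =====
-- def solution(args):
--     cats = sorted(arg[1] for arg in args)
--     answer = 1
--     run = 0
--     prev = None
--     for c in cats:
--         if c == prev:
--             run += 1
--         else:
--             answer *= run + 1
--             run = 1
--             prev = c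
--     return answer * (run + 1) - 1
-- ===== Notes on version B (the rewrite author's own statement) =====
-- stated objective: alternative
-- what changed: Replaces the hash-map category counter (dict accumulation then a product over dict.values) by sort-then-scan: sort the category keys and make one pass multiplying the answer by (run_length+1) at each boundary between runs of equal keys.
import Mathlib
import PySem

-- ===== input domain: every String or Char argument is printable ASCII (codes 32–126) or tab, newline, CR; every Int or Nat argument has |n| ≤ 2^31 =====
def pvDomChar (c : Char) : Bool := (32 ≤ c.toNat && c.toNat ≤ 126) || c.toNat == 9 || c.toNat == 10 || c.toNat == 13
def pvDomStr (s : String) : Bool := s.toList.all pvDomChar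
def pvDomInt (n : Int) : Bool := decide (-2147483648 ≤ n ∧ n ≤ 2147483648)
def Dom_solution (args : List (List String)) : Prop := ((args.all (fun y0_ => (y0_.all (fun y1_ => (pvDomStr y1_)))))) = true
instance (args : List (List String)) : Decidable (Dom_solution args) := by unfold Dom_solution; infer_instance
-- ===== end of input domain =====

-- B replaces A's hash-map category counter by sort-then-scan over runs of equal keys (alternative algorithm, same result).


-- ===== PORT A =====
-- 'map[arg[1]] = map[arg[1]] + 1 if arg[1] in map else 1' then 'for arg in map.values(): answer *= arg + 1'
def solution (args : List (List String)) : Int :=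
  let m := args.foldl (fun (d : PySem.Dict String Int) arg =>
      let k := PySem.List.pyGetD arg 1 ""
      if d.contains k then d.insert k (d.getD k 0 + 1) else d.insert k 1)
    PySem.Dict.empty
  let answer := m.values.foldl (fun acc v => acc * (v + 1)) 1
  answer - 1

-- ===== PORT B =====
-- sort the category keys, then one scan over runs of equal keys with state (answer, run, prev)
def solution_alt (args : List (List String)) : Int :=
  let cats := PySem.List.sorted (args.map (fun arg => PySem.List.pyGetD arg 1 "")) (fun x => x) false
  let s := cats.foldl (fun (st : Int × Int × Option String) c =>
      if st.2.2 == some c then (st.1, st.2.1 + 1, st.2.2)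
      else (st.1 * (st.2.1 + 1), 1, some c)) (1, 0, none)
  s.1 * (s.2.1 + 1) - 1

-- ===== PRECONDITION & SPEC =====
-- A evaluates arg[1]: it raises IndexError when some inner list has fewer than two elements, so those inputs are excluded.
def Pre_solution (args : List (List String)) : Prop := ∀ a ∈ args, 2 ≤ a.length
instance (args : List (List String)) : Decidable (Pre_solution args) := by unfold Pre_solution; infer_instance
def pvWitness_solution : List (List String) := [["red", "hat"], ["blue", "hat"], ["red", "coat"]]
def Spec_solution (args : List (List String)) (out : Int) : Prop := out = solution_alt args
instance (args : List (List String)) (out : Int) : Decidable (Spec_solution args out) := by unfold Spec_solution; infer_instance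

-- ===== CLAIM (what is proved, stated in full; the proofs are below) =====
def Claim_equal_solution : Prop := ∀ (args : List (List String)), Dom_solution args → Pre_solution args → Spec_solution args (solution args)

-- ===== LEMMAS AND PROOFS =====

def catProd (l : List String) : Int :=
  ((PySem.List.dedup l).map (fun k => (l.count k : Int) + 1)).prod

lemma catProd_perm {l₁ l₂ : List String} (h : l₁.Perm l₂) : catProd l₁ = catProd l₂ := by
  unfold catProd
  have hd : (PySem.List.dedup l₁).Perm (PySem.List.dedup l₂) := by
    rw [List.perm_ext_iff_of_nodup (PySem.List.nodup_dedup _) (PySem.List.nodup_dedup _)]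
    intro x
    simp [h.mem_iff]
  have : ((PySem.List.dedup l₁).map (fun k => (l₁.count k : Int) + 1)).Perm
      ((PySem.List.dedup l₂).map (fun k => (l₂.count k : Int) + 1)) := by
    have := hd.map (fun k => (l₁.count k : Int) + 1)
    refine this.trans ?_
    apply List.Perm.of_eq
    apply List.map_congr_left
    intro k _
    rw [h.count_eq]
  exact this.prod_eq

lemma catProd_replicate_append {n : Nat} {x : String} {t : List String} (hx : x ∉ t) :
    catProd (List.replicate n x ++ t) = (n + 1) * catProd t := by
  cases n with
  | zero => simp [catProd]
  | succ m =>
    have hperm : (PySem.List.dedup (List.replicate (m+1) x ++ t)).Perm (x :: PySem.List.dedup t) := by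
      rw [List.perm_ext_iff_of_nodup (PySem.List.nodup_dedup _) ?_]
      · intro y
        simp [eq_comm]
      · exact List.nodup_cons.mpr ⟨by simpa [PySem.List.mem_dedup] using hx, PySem.List.nodup_dedup _⟩
    unfold catProd
    have hp := (hperm.map (fun k => ((List.replicate (m+1) x ++ t).count k : Int) + 1)).prod_eq
    rw [hp]
    simp only [List.map_cons, List.prod_cons]
    have h1 : ((List.count x (List.replicate (m+1) x ++ t) : Int) + 1) = (m:Int) + 1 + 1 := by
      rw [List.count_append, List.count_replicate_self, List.count_eq_zero_of_not_mem hx]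
      push_cast; ring
    have h2 : List.map (fun k => ((List.replicate (m+1) x ++ t).count k : Int) + 1) (PySem.List.dedup t)
        = List.map (fun k => (t.count k : Int) + 1) (PySem.List.dedup t) := by
      apply List.map_congr_left
      intro k hk
      have hkx : x ≠ k := by
        rintro rfl
        exact hx (by simpa [PySem.List.mem_dedup] using hk)
      rw [List.count_append, List.count_replicate]
      simp [hkx]
    rw [h1, h2]
    push_cast; ring

def scanStep (st : Int × Int × Option String) (c : String) : Int × Int × Option String :=
  if st.2.2 == some c then (st.1, st.2.1 + 1, st.2.2)
  else (st.1 * (st.2.1 + 1), 1, some c)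

def scanVal (l : List String) : Int :=
  let s := l.foldl scanStep (1, 0, none)
  s.1 * (s.2.1 + 1)

lemma scanStep_mk (a r : Int) (p : Option String) (c : String) :
    scanStep (a, r, p) c = if p == some c then (a, r + 1, p) else (a * (r + 1), 1, some c) := rfl

lemma scan_scale (l : List String) (a b : Int) (r : Int) (p : Option String) :
    (l.foldl scanStep (a * b, r, p)).1 * ((l.foldl scanStep (a * b, r, p)).2.1 + 1)
      = a * ((l.foldl scanStep (b, r, p)).1 * ((l.foldl scanStep (b, r, p)).2.1 + 1)) := by
  induction l generalizing b r p with
  | nil => simp [mul_assoc]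
  | cons c t ih =>
    simp only [List.foldl_cons, scanStep_mk]
    by_cases h : p = some c
    · simp only [h, beq_self_eq_true, if_pos]
      exact ih b (r + 1) (some c)
    · rw [if_neg (by simp [h]), if_neg (by simp [h])]
      rw [mul_assoc]
      exact ih (b * (r + 1)) 1 (some c)

lemma scan_shift (l : List String) (a r : Int) (x : String) (hx : x ∉ l) :
    (l.foldl scanStep (a, r, some x)).1 * ((l.foldl scanStep (a, r, some x)).2.1 + 1)
      = a * (r + 1) * scanVal l := by
  cases l with
  | nil => simp [scanVal]
  | cons y t =>
    have hyx : y ≠ x := fun h => hx (h ▸ List.mem_cons_self)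
    simp only [List.foldl_cons, scanStep_mk, scanVal]
    rw [if_neg (by simp [Ne.symm hyx]), if_neg (by simp)]
    have h1 := scan_scale t (a * (r + 1)) 1 1 (some y)
    norm_num at h1 ⊢
    exact h1

lemma scanVal_sorted : ∀ (N : Nat) (l : List String), l.length ≤ N →
    l.Pairwise (· ≤ ·) → scanVal l = catProd l := by
  intro N
  induction N with
  | zero =>
    intro l hl _
    have : l = [] := List.length_eq_zero_iff.mp (Nat.le_zero.mp hl)
    subst this
    simp [scanVal, catProd]
  | succ N ih =>
    intro l hl hs
    cases l with
    | nil => simp [scanVal, catProd]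
    | cons x t =>
      -- split t into the leading run of x's and the rest
      set t1 := t.takeWhile (fun c => c == x) with ht1
      set t2 := t.dropWhile (fun c => c == x) with ht2
      have hsplit : t = t1 ++ t2 := (List.takeWhile_append_dropWhile).symm
      have ht1x : t1 = List.replicate t1.length x := by
        apply List.eq_replicate_of_mem
        intro c hc
        have := List.mem_takeWhile_imp (ht1 ▸ hc)
        simpa using this
      have hxle : ∀ c ∈ t, x ≤ c := by
        intro c hc
        exact (List.pairwise_cons.mp hs).1 c hc
      have hxt2 : x ∉ t2 := by
        intro hmem
        cases h2 : t2 with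
        | nil => simp [h2] at hmem
        | cons y t2' =>
          have hy : ¬ (y == x) = true := by
            have := List.head?_dropWhile_not (fun c => c == x) t
            rw [← ht2, h2] at this
            simpa using this
          have hyne : y ≠ x := by simpa using hy
          have hyl : x ≤ y := hxle y (by rw [hsplit, h2]; exact List.mem_append_right _ List.mem_cons_self)
          have hxy : x < y := lt_of_le_of_ne hyl (Ne.symm hyne)
          rw [h2] at hmem
          rcases List.mem_cons.mp hmem with rfl | hmem'
          · exact absurd hxy (lt_irrefl x)
          · -- x ∈ t2', but y ≤ x from pairwise on t2
            have hst2 : t2.Pairwise (· ≤ ·) := (List.pairwise_cons.mp hs).2.sublist (hsplit ▸ List.sublist_append_right t1 t2)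
            have : y ≤ x := by
              rw [h2] at hst2
              exact (List.pairwise_cons.mp hst2).1 x hmem'
            exact absurd (lt_of_lt_of_le hxy this) (lt_irrefl x)
      -- fold over the leading run
      have hrun : ∀ (n : Nat) (a r : Int), (List.replicate n x).foldl scanStep (a, r, some x) = (a, r + n, some x) := by
        intro n
        induction n with
        | zero => intro a r; simp
        | succ m ihm =>
          intro a r
          simp only [List.replicate_succ, List.foldl_cons, scanStep_mk, beq_self_eq_true, if_pos]
          rw [ihm]
          congr 1
          push_cast
          ring_nf
      have hst2 : t2.Pairwise (· ≤ ·) := (List.pairwise_cons.mp hs).2.sublist (hsplit ▸ List.sublist_append_right t1 t2)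
      have hlen2 : t2.length ≤ N := by
        have h3 : t2.length ≤ t.length := hsplit ▸ (by simp)
        have h4 : t.length + 1 ≤ N + 1 := by simpa using hl
        omega
      have hrec := ih t2 hlen2 hst2
      -- compute scanVal (x :: t)
      have hSV : scanVal (x :: t) = ((t1.length : Int) + 1 + 1) * scanVal t2 := by
        unfold scanVal
        simp only [List.foldl_cons, scanStep_mk]
        rw [if_neg (by simp)]
        rw [hsplit, List.foldl_append]
        conv_lhs => rw [ht1x]
        rw [hrun t1.length (1 * (0 + 1)) 1]
        have := scan_shift t2 (1 * (0 + 1)) (1 + (t1.length : Int)) x hxt2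
        unfold scanVal at this
        rw [this]
        push_cast
        ring
      rw [hSV, hrec]
      have hcp : catProd (x :: t) = ((t1.length : Int) + 1 + 1) * catProd t2 := by
        have : x :: t = List.replicate (t1.length + 1) x ++ t2 := by
          rw [List.replicate_succ, List.cons_append, hsplit]
          congr 1
          rw [← ht1x]
        rw [this, catProd_replicate_append hxt2]
        push_cast
        ring
      rw [hcp]

lemma foldl_mul_succ (l : List Int) (a : Int) :
    l.foldl (fun acc v => acc * (v + 1)) a = a * (l.map (fun v => v + 1)).prod := by
  induction l generalizing a with
  | nil => simp
  | cons v t ih => simp [ih, mul_assoc]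

lemma solution_eq_catProd (args : List (List String)) :
    solution args = catProd (args.map (fun arg => PySem.List.pyGetD arg 1 "")) - 1 := by
  have hstep : (fun (d : PySem.Dict String Int) (arg : List String) =>
      let k := PySem.List.pyGetD arg 1 ""
      if d.contains k then d.insert k (d.getD k 0 + 1) else d.insert k 1)
      = (fun d arg => d.insert (PySem.List.pyGetD arg 1 "")
          (d.getD (PySem.List.pyGetD arg 1 "") 0 + 1)) := by
    funext d arg
    by_cases h : d.contains (PySem.List.pyGetD arg 1 "")
    · simp [h]
    · simp only [Bool.not_eq_true] at h
      simp only [h, Bool.false_eq_true, if_false]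
      rw [PySem.Dict.getD_of_not_contains]
      · norm_num
      · exact h
  have hA : solution args = ((args.foldl (fun (d : PySem.Dict String Int) arg =>
      let k := PySem.List.pyGetD arg 1 ""
      if d.contains k then d.insert k (d.getD k 0 + 1) else d.insert k 1)
      PySem.Dict.empty).values.foldl (fun acc v => acc * (v + 1)) 1) - 1 := rfl
  rw [hA, hstep,
    ← List.foldl_map (f := fun arg => PySem.List.pyGetD arg 1 "")
      (g := fun (d : PySem.Dict String Int) k => d.insert k (d.getD k 0 + 1)) (l := args) (init := PySem.Dict.empty),
    PySem.Dict.foldl_insert_getD_add_one_eq_counter]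
  set ks := args.map (fun arg => PySem.List.pyGetD arg 1 "") with hks
  have hv : (PySem.Dict.counter ks).values
      = (PySem.Set.ofList ks).map (fun k => (ks.count k : Int)) := by
    show ((PySem.Dict.counter ks).items).map (·.2) = _
    rw [PySem.Dict.items_counter]
    simp [List.map_map, Function.comp]
  rw [hv, foldl_mul_succ]
  unfold catProd
  simp [List.map_map, Function.comp_def, PySem.List.dedup_eq_ofList]

lemma solution_alt_eq_catProd (args : List (List String)) :
    solution_alt args = catProd (args.map (fun arg => PySem.List.pyGetD arg 1 "")) - 1 := by
  have h0 : solution_alt args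
      = scanVal (PySem.List.sorted (args.map (fun arg => PySem.List.pyGetD arg 1 "")) (fun x => x) false) - 1 := rfl
  rw [h0]
  rw [scanVal_sorted (PySem.List.sorted (args.map (fun arg => PySem.List.pyGetD arg 1 "")) (fun x => x) false).length _
    le_rfl (PySem.List.sorted_pairwise _ _)]
  rw [catProd_perm (PySem.List.sorted_perm _ _ _)]

-- ===== VERDICT (by name: the statement is the Claim_ definition above) =====
theorem solution_spec : Claim_equal_solution := by
  intro args _ _
  unfold Spec_solution
  rw [solution_eq_catProd, solution_alt_eq_catProd]
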